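-- pv_equiv track=rewrite | github.com/fabianomonteirofarias-prof/dsa-gfg | 01 - Logic Building/036. Recurring Sequence in a Fraction.py | naive_approach
-- ===== SOURCE A (Python) =====
-- def naive_approach(a: int, b: int):
--     res = ""
--     mp = {}
--     rem = a % b
--     while (rem != 0) and (rem not in mp):
--         mp[rem] = len(res)
--
--         rem *= 10
--         res += str(rem // b)
--         rem %= b
--
--     if rem == 0:
--         return "No recurring sequence."
--
--     return res[mp[rem]:]
-- ===== SOURCE B (Python) =====
-- def naive_approach(a: int, b: int):
--     # Two passes over the remainder orbit: pass 1 finds the cycle-start remainder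
--     # with a plain set (no digit/position bookkeeping); pass 2 emits digits from
--     # that remainder until it comes around again.
--     seen = set()
--     rem = a % b
--     while rem != 0 and rem not in seen:
--         seen.add(rem)
--         rem = rem * 10 % b
--     if rem == 0:
--         return "No recurring sequence."
--     start = rem
--     res = ""
--     while True:
--         rem *= 10
--         res += str(rem // b)
--         rem %= b
--         if rem == start:
--             break
--     return res
-- ===== Notes on version B (the rewrite author's own statement) =====
-- stated objective: alternative
-- what changed: A records a position dict and slices the accumulated digit string at the first occurrence of the repeated remainder; B first walks the remainder orbit with a plain set to find the cycle-start remainder, then re-generates exactly one cycle of digits from it, so no digit string or positions are kept during detection.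
import Mathlib
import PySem

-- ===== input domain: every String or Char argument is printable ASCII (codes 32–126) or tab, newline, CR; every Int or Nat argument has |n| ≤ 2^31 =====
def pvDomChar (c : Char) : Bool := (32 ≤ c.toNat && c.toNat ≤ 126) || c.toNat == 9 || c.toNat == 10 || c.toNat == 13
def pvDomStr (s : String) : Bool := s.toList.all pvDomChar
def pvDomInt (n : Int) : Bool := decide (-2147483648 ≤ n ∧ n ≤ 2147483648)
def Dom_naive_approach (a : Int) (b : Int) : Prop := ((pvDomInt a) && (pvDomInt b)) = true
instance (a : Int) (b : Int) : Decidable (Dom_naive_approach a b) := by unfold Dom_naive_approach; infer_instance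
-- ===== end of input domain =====

-- B replaces A's position-dict-and-slice bookkeeping by a two-pass scheme (set of seen
-- remainders to find the cycle start, then regenerate one digit cycle); same return value.

-- ===== PORT A =====
-- A's while loop, fuel-recursive; fuel b.natAbs + 1 exceeds the number of distinct
-- nonzero remainders mod b, so the loop always exits by its own condition (proved below).
def pvLoopA (b : Int) : Nat → List Char → PySem.Dict Int Int → Int →
    List Char × PySem.Dict Int Int × Int
  | 0, res, mp, rem => (res, mp, rem)
  | f+1, res, mp, rem =>
    if rem ≠ 0 ∧ mp.get? rem = none then
      pvLoopA b f (res ++ PySem.Int.toChars (PySem.Int.floordiv (rem * 10) b))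
        (mp.insert rem (res.length : Int)) (PySem.Int.mod (rem * 10) b)
    else (res, mp, rem)

-- the code after the loop; mp[rem] is read with getD 0 — with the fuel above the key is
-- always present on the branch that reads it (Python never reaches a KeyError here)
def pvFinishA (st : List Char × PySem.Dict Int Int × Int) : String :=
  if st.2.2 = 0 then "No recurring sequence."
  else String.ofList (PySem.Chars.slice st.1 (some (st.2.1.getD st.2.2 0)) none)

def naive_approach (a : Int) (b : Int) : String :=
  pvFinishA (pvLoopA b (b.natAbs + 1) [] PySem.Dict.empty (PySem.Int.mod a b))

-- ===== PORT B =====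
-- pass 1: advance rem while nonzero and unseen (set of remainders only)
def pvSeenB (b : Int) : Nat → PySem.Set Int → Int → Int
  | 0, _, rem => rem
  | f+1, seen, rem =>
    if rem ≠ 0 ∧ ¬ PySem.Set.contains seen rem = true then
      pvSeenB b f (PySem.Set.add seen rem) (PySem.Int.mod (rem * 10) b)
    else rem

-- pass 2: emit digits from the cycle-start remainder until it recurs (do-while)
def pvEmitB (b start : Int) : Nat → Int → List Char → List Char
  | 0, _, acc => acc
  | f+1, rem, acc =>
    if PySem.Int.mod (rem * 10) b = start then
      acc ++ PySem.Int.toChars (PySem.Int.floordiv (rem * 10) b)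
    else
      pvEmitB b start f (PySem.Int.mod (rem * 10) b)
        (acc ++ PySem.Int.toChars (PySem.Int.floordiv (rem * 10) b))

-- the code after pass 1: message, or one emitted cycle
def pvFinishB (b : Int) (f : Nat) (r : Int) : String :=
  if r = 0 then "No recurring sequence."
  else String.ofList (pvEmitB b r f r [])

def naive_approach_alt (a : Int) (b : Int) : String :=
  pvFinishB b (b.natAbs + 1) (pvSeenB b (b.natAbs + 1) PySem.Set.empty (PySem.Int.mod a b))

-- ===== PRECONDITION & SPEC =====
-- Python raises ZeroDivisionError (in a % b) exactly when b = 0; both programs need b ≠ 0.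
def Pre_naive_approach (a : Int) (b : Int) : Prop := b ≠ 0
instance (a : Int) (b : Int) : Decidable (Pre_naive_approach a b) := by
  unfold Pre_naive_approach; infer_instance

def pvWitness_naive_approach : Int × Int := (1, 3)

def Spec_naive_approach (a : Int) (b : Int) (out : String) : Prop := out = naive_approach_alt a b
instance (a : Int) (b : Int) (out : String) : Decidable (Spec_naive_approach a b out) := by
  unfold Spec_naive_approach; infer_instance

-- ===== CLAIM (what is proved, stated in full; the proofs are below) =====
def Claim_equal_naive_approach : Prop := ∀ (a : Int) (b : Int), Dom_naive_approach a b → Pre_naive_approach a b → Spec_naive_approach a b (naive_approach a b)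

-- ===== LEMMAS AND PROOFS =====

-- abstract remainder orbit and digit stream of a/b
def pvStep (b r : Int) : Int := PySem.Int.mod (r * 10) b
def pvDig (b r : Int) : List Char := PySem.Int.toChars (PySem.Int.floordiv (r * 10) b)
def pvIter (b : Int) : Nat → Int → Int
  | 0, r => r
  | n+1, r => pvIter b n (pvStep b r)
def pvDigs (b : Int) : Nat → Int → List Char
  | 0, _ => []
  | n+1, r => pvDig b r ++ pvDigs b n (pvStep b r)

theorem pvIter_add (b : Int) (m k : Nat) : ∀ r, pvIter b (m + k) r = pvIter b k (pvIter b m r) := by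
  induction m with
  | zero => intro r; simp [pvIter]
  | succ m ih =>
    intro r
    have : m + 1 + k = (m + k) + 1 := by omega
    rw [this]
    show pvIter b (m + k) (pvStep b r) = pvIter b k (pvIter b m (pvStep b r))
    exact ih (pvStep b r)

theorem pvIter_succ_right (b : Int) (n : Nat) (r : Int) :
    pvIter b (n + 1) r = pvStep b (pvIter b n r) := by
  have := pvIter_add b n 1 r
  simpa [pvIter] using this

theorem pvDigs_add (b : Int) (m k : Nat) : ∀ r,
    pvDigs b (m + k) r = pvDigs b m r ++ pvDigs b k (pvIter b m r) := by
  induction m with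
  | zero => intro r; simp [pvDigs, pvIter]
  | succ m ih =>
    intro r
    have : m + 1 + k = (m + k) + 1 := by omega
    rw [this]
    show pvDig b r ++ pvDigs b (m + k) (pvStep b r) = _
    rw [ih (pvStep b r)]
    simp [pvDigs, pvIter]

-- full characterisation of A's loop (trajectory, dict contents, halting)
theorem pvLoopA_char (b : Int) : ∀ (f : Nat) (res : List Char) (mp : PySem.Dict Int Int) (rem : Int),
    ∃ n, n ≤ f ∧
      (pvLoopA b f res mp rem).1 = res ++ pvDigs b n rem ∧
      (pvLoopA b f res mp rem).2.2 = pvIter b n rem ∧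
      (∀ i, i < n → pvIter b i rem ≠ 0 ∧ mp.get? (pvIter b i rem) = none) ∧
      (∀ i j, i < j → j < n → pvIter b i rem ≠ pvIter b j rem) ∧
      (∀ i, i < n → (pvLoopA b f res mp rem).2.1.get? (pvIter b i rem)
          = some ((res ++ pvDigs b i rem).length : Int)) ∧
      (∀ x v, mp.get? x = some v → (pvLoopA b f res mp rem).2.1.get? x = some v) ∧
      (∀ x, (pvLoopA b f res mp rem).2.1.get? x ≠ none →
          mp.get? x ≠ none ∨ ∃ i, i < n ∧ x = pvIter b i rem) ∧
      (n < f → pvIter b n rem = 0 ∨ (pvLoopA b f res mp rem).2.1.get? (pvIter b n rem) ≠ none) := by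
  intro f
  induction f with
  | zero =>
    intro res mp rem
    refine ⟨0, Nat.le_refl 0, by simp [pvLoopA, pvDigs], by simp [pvLoopA, pvIter],
      fun i hi => absurd hi (Nat.not_lt_zero i),
      fun i j _ hj => absurd hj (Nat.not_lt_zero j),
      fun i hi => absurd hi (Nat.not_lt_zero i),
      fun x v h => by simpa [pvLoopA] using h,
      fun x h => Or.inl (by simpa [pvLoopA] using h),
      fun h => absurd h (Nat.not_lt_zero 0)⟩
  | succ f ih =>
    intro res mp rem
    by_cases hc : rem ≠ 0 ∧ mp.get? rem = none
    · obtain ⟨hr0, hmp0⟩ := hc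
      have hL : pvLoopA b (f+1) res mp rem =
          pvLoopA b f (res ++ pvDig b rem) (mp.insert rem ((res.length : Int))) (pvStep b rem) := by
        simp [pvLoopA, hr0, hmp0, pvDig, pvStep]
      obtain ⟨n, hnf, h1, h2, h3, h4, h5, h6, h7, h8⟩ :=
        ih (res ++ pvDig b rem) (mp.insert rem ((res.length : Int))) (pvStep b rem)
      have hnone : ∀ x : Int, (mp.insert rem ((res.length : Int))).get? x = none → mp.get? x = none := by
        intro x hx
        rw [PySem.Dict.get?_insert] at hx
        by_cases hxr : x = rem
        · simp [hxr] at hx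
        · simpa [hxr] using hx
      refine ⟨n + 1, by omega, ?_, ?_, ?_, ?_, ?_, ?_, ?_, ?_⟩
      · rw [hL, h1]; simp [pvDigs]
      · rw [hL, h2]; simp [pvIter]
      · intro i hi
        cases i with
        | zero => exact ⟨hr0, hmp0⟩
        | succ i =>
          have h3i := h3 i (by omega)
          exact ⟨by simpa [pvIter] using h3i.1, by simpa [pvIter] using hnone _ h3i.2⟩
      · intro i j hij hj
        cases j with
        | zero => omega
        | succ j =>
          cases i with
          | zero =>
            intro heq
            have hsome := PySem.Dict.get?_insert_self mp rem ((res.length : Int))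
            have hnone2 := (h3 j (by omega)).2
            rw [show pvIter b 0 rem = rem from rfl] at heq
            rw [show pvIter b (j+1) rem = pvIter b j (pvStep b rem) from rfl] at heq
            rw [← heq] at hnone2
            rw [hsome] at hnone2
            exact Option.some_ne_none _ hnone2
          | succ i =>
            have := h4 i j (by omega) (by omega)
            simpa [pvIter] using this
      · intro i hi
        rw [hL]
        cases i with
        | zero =>
          have := h6 rem ((res.length : Int)) (PySem.Dict.get?_insert_self mp rem ((res.length : Int)))
          simpa [pvIter, pvDigs] using this
        | succ i =>
          have := h5 i (by omega)
          simpa [pvIter, pvDigs, List.append_assoc] using this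
      · intro x v hxv
        rw [hL]
        apply h6
        rw [PySem.Dict.get?_insert]
        have hxr : x ≠ rem := by
          intro h; rw [h, hmp0] at hxv; cases hxv
        simpa [hxr] using hxv
      · intro x hx
        rw [hL] at hx
        rcases h7 x hx with h | ⟨i, hin, hxi⟩
        · by_cases hxr : x = rem
          · exact Or.inr ⟨0, by omega, by simpa [pvIter] using hxr⟩
          · rw [PySem.Dict.get?_insert] at h
            simp only [if_neg hxr] at h
            exact Or.inl h
        · exact Or.inr ⟨i + 1, by omega, by simpa [pvIter] using hxi⟩
      · intro hlt
        rw [hL]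
        have := h8 (by omega)
        simpa [pvIter] using this
    · have hL : pvLoopA b (f+1) res mp rem = (res, mp, rem) := by
        simp only [pvLoopA, if_neg hc]
      refine ⟨0, by omega, by simp [hL, pvDigs], by simp [hL, pvIter],
        fun i hi => absurd hi (Nat.not_lt_zero i),
        fun i j _ hj => absurd hj (Nat.not_lt_zero j),
        fun i hi => absurd hi (Nat.not_lt_zero i),
        fun x v h => by simpa [hL] using h,
        fun x h => Or.inl (by simpa [hL] using h), ?_⟩
      intro _
      rcases not_and_or.mp hc with h | h
      · exact Or.inl (by simpa [pvIter] using not_not.mp h)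
      · exact Or.inr (by simpa [hL, pvIter] using h)

-- at most |b| - 1 distinct nonzero remainders exist
theorem pvPigeon (b : Int) (hb : b ≠ 0) (g : Nat → Int) (n : Nat)
    (hmod : ∀ i, i < n → ∃ x, g i = PySem.Int.mod x b)
    (h0 : ∀ i, i < n → g i ≠ 0)
    (hinj : ∀ i j, i < j → j < n → g i ≠ g j) :
    n ≤ b.natAbs - 1 := by
  have hb1 : 0 < b.natAbs := Int.natAbs_pos.mpr hb
  have hbounds : ∀ i, i < n → (0 < b → 0 ≤ g i ∧ g i < b) ∧ (b < 0 → b < g i ∧ g i ≤ 0) := by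
    intro i hi
    obtain ⟨x, hx⟩ := hmod i hi
    constructor
    · intro hpos
      rw [hx]
      exact ⟨PySem.Int.mod_nonneg x hpos, PySem.Int.mod_lt x hpos⟩
    · intro hneg
      rw [hx]
      exact PySem.Int.mod_neg_bounds x hneg
  have hcard : (Finset.range n).card ≤ (Finset.Icc 1 (b.natAbs - 1)).card := by
    apply Finset.card_le_card_of_injOn (fun i => (g i).natAbs)
    · intro i hi
      have hi' : i < n := by simpa using hi
      have hbi := hbounds i hi'
      have h0i := h0 i hi'
      have hgoal : 1 ≤ (g i).natAbs ∧ (g i).natAbs ≤ b.natAbs - 1 := by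
        rcases lt_or_gt_of_ne hb with hneg | hpos
        · have := hbi.2 hneg; omega
        · have := hbi.1 hpos; omega
      simpa using hgoal
    · intro i hi j hj heq
      have hi : i < n := by simpa using hi
      have hj : j < n := by simpa using hj
      simp only at heq
      by_contra hne
      rcases Nat.lt_or_ge i j with h | h
      · have hbi := hbounds i hi
        have hbj := hbounds j hj
        have hne' := hinj i j h hj
        rcases lt_or_gt_of_ne hb with hneg | hpos
        · have b1 := hbi.2 hneg; have b2 := hbj.2 hneg; omega
        · have b1 := hbi.1 hpos; have b2 := hbj.1 hpos; omega
      · have hji : j < i := by omega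
        have hbi := hbounds i hi
        have hbj := hbounds j hj
        have hne' := hinj j i hji hi
        rcases lt_or_gt_of_ne hb with hneg | hpos
        · have b1 := hbi.2 hneg; have b2 := hbj.2 hneg; omega
        · have b1 := hbi.1 hpos; have b2 := hbj.1 hpos; omega
  rw [Finset.card_range, Nat.card_Icc] at hcard
  omega

-- A's loop and B's pass 1 advance rem in lockstep while keys(mp) = seen
theorem pvLockstep (b : Int) : ∀ (f : Nat) (res : List Char) (mp : PySem.Dict Int Int)
    (seen : PySem.Set Int) (rem : Int),
    (∀ x : Int, mp.get? x = none ↔ PySem.Set.contains seen x = false) →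
    pvSeenB b f seen rem = (pvLoopA b f res mp rem).2.2 := by
  intro f
  induction f with
  | zero => intro res mp seen rem _; simp [pvSeenB, pvLoopA]
  | succ f ih =>
    intro res mp seen rem h
    by_cases hr : rem = 0
    · simp [pvSeenB, pvLoopA, hr]
    · by_cases hm : mp.get? rem = none
      · have hs : PySem.Set.contains seen rem = false := (h rem).mp hm
        rw [show pvSeenB b (f+1) seen rem
            = pvSeenB b f (PySem.Set.add seen rem) (PySem.Int.mod (rem * 10) b) from by
          simp only [pvSeenB]
          rw [if_pos ⟨hr, by rw [hs]; exact Bool.false_ne_true⟩]]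
        rw [show pvLoopA b (f+1) res mp rem
            = pvLoopA b f (res ++ PySem.Int.toChars (PySem.Int.floordiv (rem * 10) b))
                (mp.insert rem ((res.length : Int))) (PySem.Int.mod (rem * 10) b) from by
          simp [pvLoopA, hr, hm]]
        apply ih
        intro x
        rw [PySem.Dict.get?_insert]
        by_cases hx : x = rem
        · subst hx
          rw [if_pos rfl]
          constructor
          · intro hfalse; cases hfalse
          · intro hfalse
            have : PySem.Set.contains (PySem.Set.add seen x) x = true :=
              (PySem.Set.contains_iff _ _).mpr ((PySem.Set.mem_add _ _ _).mpr (Or.inr rfl))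
            rw [this] at hfalse; cases hfalse
        · simp only [if_neg hx]
          rw [h x]
          constructor
          · intro hfalse
            by_contra hne
            have htrue : PySem.Set.contains (PySem.Set.add seen rem) x = true := by
              cases hcc : PySem.Set.contains (PySem.Set.add seen rem) x
              · exact absurd hcc hne
              · rfl
            have := (PySem.Set.mem_add _ _ _).mp ((PySem.Set.contains_iff _ _).mp htrue)
            rcases this with hmem | heq
            · have : PySem.Set.contains seen x = true := (PySem.Set.contains_iff _ _).mpr hmem
              rw [this] at hfalse; cases hfalse
            · exact hx heq
          · intro hfalse
            cases hcc : PySem.Set.contains seen x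
            · rfl
            · have hmem := (PySem.Set.contains_iff _ _).mp hcc
              have : PySem.Set.contains (PySem.Set.add seen rem) x = true :=
                (PySem.Set.contains_iff _ _).mpr ((PySem.Set.mem_add _ _ _).mpr (Or.inl hmem))
              rw [this] at hfalse; cases hfalse
      · have hs : PySem.Set.contains seen rem = true := by
          cases hcc : PySem.Set.contains seen rem
          · exact absurd ((h rem).mpr hcc) hm
          · rfl
        simp only [pvSeenB, pvLoopA]
        rw [if_neg (fun h => h.2 hs), if_neg (fun h => hm h.2)]

-- B's pass 2 emits exactly the digits of the (shortest) cycle back to start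
theorem pvEmit_eq (b start : Int) : ∀ (f m : Nat) (r : Int) (acc : List Char),
    0 < m → m ≤ f → pvIter b m r = start →
    (∀ j, 0 < j → j < m → pvIter b j r ≠ start) →
    pvEmitB b start f r acc = acc ++ pvDigs b m r := by
  intro f
  induction f with
  | zero => intro m r acc h1 h2 _ _; omega
  | succ f ih =>
    intro m r acc hm hmf hit hmin
    by_cases hs : PySem.Int.mod (r * 10) b = start
    · have hm1 : m = 1 := by
        by_contra hne
        exact hmin 1 (by omega) (by omega) (by simpa [pvIter, pvStep] using hs)
      subst hm1
      simp [pvEmitB, hs, pvDigs, pvDig]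
    · have hm2 : 2 ≤ m := by
        rcases Nat.lt_or_ge m 2 with h | h
        · have hm1 : m = 1 := by omega
          rw [hm1] at hit
          exact absurd (by simpa [pvIter, pvStep] using hit) hs
        · exact h
      rw [show pvEmitB b start (f+1) r acc
          = pvEmitB b start f (PySem.Int.mod (r * 10) b) (acc ++ pvDig b r) from by
        simp [pvEmitB, hs, pvDig]]
      have hit' : pvIter b (m - 1) (pvStep b r) = start := by
        rw [show pvIter b (m - 1) (pvStep b r) = pvIter b ((m - 1) + 1) r from rfl]
        rw [show (m - 1) + 1 = m from by omega]
        exact hit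
      have hmin' : ∀ j, 0 < j → j < m - 1 → pvIter b j (pvStep b r) ≠ start := by
        intro j hj1 hj2
        have := hmin (j + 1) (by omega) (by omega)
        simpa [pvIter] using this
      show pvEmitB b start f (pvStep b r) (acc ++ pvDig b r) = acc ++ pvDigs b m r
      rw [ih (m - 1) (pvStep b r) (acc ++ pvDig b r) (by omega) (by omega) hit' hmin']
      rw [show m = (m - 1) + 1 from by omega]
      simp [pvDigs, List.append_assoc]

theorem pvMain (a b : Int) (hb : b ≠ 0) : naive_approach a b = naive_approach_alt a b := by
  obtain ⟨n, hnF, h1, h2, h3, h4, h5, h6, h7, h8⟩ :=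
    pvLoopA_char b (b.natAbs + 1) [] PySem.Dict.empty (PySem.Int.mod a b)
  have hb1 : 0 < b.natAbs := Int.natAbs_pos.mpr hb
  have hnb : n ≤ b.natAbs - 1 := by
    apply pvPigeon b hb (fun i => pvIter b i (PySem.Int.mod a b)) n
    · intro i _
      cases i with
      | zero => exact ⟨a, rfl⟩
      | succ i =>
        refine ⟨pvIter b i (PySem.Int.mod a b) * 10, ?_⟩
        rw [pvIter_succ_right]
        rfl
    · intro i hi; exact (h3 i hi).1
    · exact h4
  have hhalt := h8 (by omega)
  have hsB : pvSeenB b (b.natAbs + 1) PySem.Set.empty (PySem.Int.mod a b)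
      = (pvLoopA b (b.natAbs + 1) [] PySem.Dict.empty (PySem.Int.mod a b)).2.2 := by
    apply pvLockstep
    intro x
    constructor
    · intro _
      cases hcc : PySem.Set.contains PySem.Set.empty x
      · rfl
      · exact absurd ((PySem.Set.contains_iff _ _).mp hcc) (List.not_mem_nil)
    · intro _; exact PySem.Dict.get?_empty x
  rw [show naive_approach a b
      = pvFinishA (pvLoopA b (b.natAbs + 1) [] PySem.Dict.empty (PySem.Int.mod a b)) from rfl]
  rw [show naive_approach_alt a b
      = pvFinishB b (b.natAbs + 1)
          (pvSeenB b (b.natAbs + 1) PySem.Set.empty (PySem.Int.mod a b)) from rfl]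
  rw [hsB]
  by_cases hz : pvIter b n (PySem.Int.mod a b) = 0
  · rw [pvFinishA, pvFinishB, h2, hz]
    simp
  · have hget : (pvLoopA b (b.natAbs + 1) [] PySem.Dict.empty (PySem.Int.mod a b)).2.1.get?
        (pvIter b n (PySem.Int.mod a b)) ≠ none := by
      rcases hhalt with h | h
      · exact absurd h hz
      · exact h
    obtain ⟨i, hin, hxi⟩ : ∃ i, i < n ∧
        pvIter b n (PySem.Int.mod a b) = pvIter b i (PySem.Int.mod a b) := by
      rcases h7 _ hget with h | h
      · exact absurd (PySem.Dict.get?_empty _) h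
      · exact h
    have hlook := h5 i hin
    rw [List.nil_append] at hlook
    have hgetD : (pvLoopA b (b.natAbs + 1) [] PySem.Dict.empty (PySem.Int.mod a b)).2.1.getD
        (pvLoopA b (b.natAbs + 1) [] PySem.Dict.empty (PySem.Int.mod a b)).2.2 0
        = ((pvDigs b i (PySem.Int.mod a b)).length : Int) := by
      rw [h2, hxi]
      exact PySem.Dict.getD_of_get?_eq_some _ 0 hlook
    have hsplit := pvDigs_add b i (n - i) (PySem.Int.mod a b)
    rw [Nat.add_sub_cancel' (Nat.le_of_lt hin)] at hsplit
    have hznz : (pvLoopA b (b.natAbs + 1) [] PySem.Dict.empty (PySem.Int.mod a b)).2.2 ≠ 0 := by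
      rw [h2]; exact hz
    rw [pvFinishA, pvFinishB, if_neg hznz, if_neg hznz]
    rw [hgetD, h1, List.nil_append, h2]
    have hemit : pvEmitB b (pvIter b n (PySem.Int.mod a b)) (b.natAbs + 1)
        (pvIter b n (PySem.Int.mod a b)) []
        = [] ++ pvDigs b (n - i) (pvIter b n (PySem.Int.mod a b)) := by
      apply pvEmit_eq
      · omega
      · omega
      · rw [hxi]
        rw [← pvIter_add]
        rw [Nat.add_sub_cancel' (Nat.le_of_lt hin), ← hxi]
      · intro j hj1 hj2 heq
        rw [hxi, ← pvIter_add] at heq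
        exact h4 i (i + j) (by omega) (by omega) heq.symm
    rw [hemit, List.nil_append]
    rw [hsplit]
    rw [PySem.Chars.slice_eq_listSlice, PySem.List.slice_from_natCast]
    rw [List.drop_left]
    rw [hxi]

-- ===== VERDICT (by name: the statement is the Claim_ definition above) =====
theorem naive_approach_spec : Claim_equal_naive_approach := by
  intro a b _ hb
  exact pvMain a b hb
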